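-- pv_equiv track=rewrite | github.com/jeetswadia/keno_optimizer | Keno_optimizer_gpu.py | _bad_run
-- ===== SOURCE A (Python) =====
-- def _bad_run(picks, num, max_consecutive=2):
--     test = sorted(picks + [num])
--     run = 1
--     for i in range(1, len(test)):
--         if test[i] == test[i-1] + 1:
--             run += 1
--             if run > max_consecutive:
--                 return True
--         else:
--             run = 1
--     return False
-- ===== SOURCE B (Python) =====
-- def _bad_run(picks, num, max_consecutive=2):
--     counts = {}
--     for v in picks:
--         counts[v] = counts.get(v, 0) + 1
--     counts[num] = counts.get(num, 0) + 1
--     run = 1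
--     prev = None
--     for v in sorted(counts):
--         if prev is not None and v == prev + 1:
--             run += 1
--             if run > max_consecutive:
--                 return True
--         else:
--             run = 1
--         if counts[v] > 1:
--             # a duplicated value breaks any run through it; a new run may start here
--             run = 1
--         prev = v
--     return False
-- ===== Notes on version B (the rewrite author's own statement) =====
-- stated objective: alternative
-- what changed: B replaces A's scan over the full sorted multiset by a counting dict plus a single scan of the sorted distinct values (a run-length-compressed view), resetting the run at values with multiplicity > 1 instead of walking their equal copies.
import Mathlib
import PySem

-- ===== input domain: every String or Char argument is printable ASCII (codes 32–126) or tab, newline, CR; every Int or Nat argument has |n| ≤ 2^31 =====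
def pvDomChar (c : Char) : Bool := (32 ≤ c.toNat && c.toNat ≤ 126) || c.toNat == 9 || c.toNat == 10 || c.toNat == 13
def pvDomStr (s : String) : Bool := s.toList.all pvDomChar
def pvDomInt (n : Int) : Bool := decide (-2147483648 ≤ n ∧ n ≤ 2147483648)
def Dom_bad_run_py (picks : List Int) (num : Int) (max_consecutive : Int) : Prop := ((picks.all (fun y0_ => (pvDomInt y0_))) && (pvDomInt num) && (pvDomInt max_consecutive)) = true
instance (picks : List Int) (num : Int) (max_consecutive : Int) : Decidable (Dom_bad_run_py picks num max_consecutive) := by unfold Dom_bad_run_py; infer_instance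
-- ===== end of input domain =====

-- B replaces A's scan of the sorted multiset by a counting dict plus a scan of the
-- sorted DISTINCT values (run-length compressed), with a run reset at duplicated values;
-- objective: alternative (different data structure / traversal), same return value.

-- ===== PORT A =====
-- the 'for i in range(1, len(test))' loop of A, state 'run'; returns early on True
def pvALoop (test : List Int) (m : Int) : List Int → Int → Bool
  | [], _ => false
  | i :: is, run =>
    if PySem.List.pyGetD test i 0 = PySem.List.pyGetD test (i - 1) 0 + 1 then
      if run + 1 > m then true else pvALoop test m is (run + 1)
    else pvALoop test m is 1

def bad_run_py (picks : List Int) (num : Int) (max_consecutive : Int) : Bool :=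
  let test := PySem.List.sorted (picks ++ [num]) (fun x => x) false
  pvALoop test max_consecutive (PySem.List.pyRange 1 (test.length : Int) 1) 1

-- ===== PORT B =====
-- the 'for v in sorted(counts)' loop of B, state (prev, run); returns early on True
def pvBLoop (counts : PySem.Dict Int Int) (m : Int) : List Int → Option Int → Int → Bool
  | [], _, _ => false
  | v :: ks, prev, run =>
    match prev with
    | some p =>
      if v = p + 1 then
        if run + 1 > m then true
        else pvBLoop counts m ks (some v) (if counts.getD v 0 > 1 then 1 else run + 1)
      else pvBLoop counts m ks (some v) (if counts.getD v 0 > 1 then 1 else 1)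
    | none => pvBLoop counts m ks (some v) (if counts.getD v 0 > 1 then 1 else 1)

def bad_run_py_alt (picks : List Int) (num : Int) (max_consecutive : Int) : Bool :=
  let c0 := picks.foldl (fun d v => d.insert v (d.getD v 0 + 1)) PySem.Dict.empty
  let counts := c0.insert num (c0.getD num 0 + 1)
  pvBLoop counts max_consecutive (PySem.List.sorted counts.keys (fun x => x) false) none 1

-- ===== PRECONDITION & SPEC =====
def Spec_bad_run_py (picks : List Int) (num : Int) (max_consecutive : Int) (out : Bool) : Prop := out = bad_run_py_alt picks num max_consecutive
instance (picks : List Int) (num : Int) (max_consecutive : Int) (out : Bool) : Decidable (Spec_bad_run_py picks num max_consecutive out) := by unfold Spec_bad_run_py; infer_instance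

-- ===== CLAIM (what is proved, stated in full; the proofs are below) =====
def Claim_equal_bad_run_py : Prop := ∀ (picks : List Int) (num : Int) (max_consecutive : Int), Dom_bad_run_py picks num max_consecutive → Spec_bad_run_py picks num max_consecutive (bad_run_py picks num max_consecutive)

-- ===== LEMMAS AND PROOFS =====

-- A's scan expressed structurally: prev value, remaining values, current run
def pvAdj (m : Int) : Int → List Int → Int → Bool
  | _, [], _ => false
  | p, y :: ys, run =>
    if y = p + 1 then
      if run + 1 > m then true else pvAdj m y ys (run + 1)
    else pvAdj m y ys 1

-- A's index loop over a decomposed list is the structural scan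
theorem pvALoop_eq_pvAdj (m : Int) : ∀ (rest : List Int) (pre : List Int) (y : Int) (run : Int),
    pvALoop (pre ++ y :: rest) m
      (PySem.List.pyRange ((pre.length : Int) + 1) ((pre.length : Int) + 1 + rest.length) 1) run
      = pvAdj m y rest run := by
  intro rest
  induction rest with
  | nil =>
    intro pre y run
    rw [PySem.List.pyRange_one_eq_nil (by simp)]
    rfl
  | cons z rs ih =>
    intro pre y run
    rw [PySem.List.pyRange_one_cons (by simp)]
    have e1 : PySem.List.pyGetD (pre ++ y :: z :: rs) ((pre.length : Int) + 1) 0 = z := by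
      rw [show ((pre.length : Int) + 1) = ((pre.length + 1 : Nat) : Int) from by push_cast; ring,
        PySem.List.pyGetD_natCast,
        show pre ++ y :: z :: rs = (pre ++ [y]) ++ z :: rs from by simp]
      rw [List.getD_append_right] <;> simp
    have e2 : PySem.List.pyGetD (pre ++ y :: z :: rs) ((pre.length : Int) + 1 - 1) 0 = y := by
      rw [show ((pre.length : Int) + 1 - 1) = ((pre.length : Nat) : Int) from by ring,
        PySem.List.pyGetD_natCast]
      rw [List.getD_append_right] <;> simp
    have hlist : pre ++ y :: z :: rs = (pre ++ [y]) ++ z :: rs := by simp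
    have hstep : ∀ r : Int,
        pvALoop (pre ++ y :: z :: rs) m
          (PySem.List.pyRange ((pre.length : Int) + 1 + 1)
            ((pre.length : Int) + 1 + ((z :: rs).length : Int)) 1) r = pvAdj m z rs r := by
      intro r
      rw [hlist,
        show ((pre.length : Int) + 1 + 1) = (((pre ++ [y]).length : Int) + 1) from by simp,
        show ((pre.length : Int) + 1 + ((z :: rs).length : Int))
            = (((pre ++ [y]).length : Int) + 1 + (rs.length : Int)) from by simp; ring]
      exact ih (pre ++ [y]) z r
    simp only [pvALoop, e1, e2, pvAdj, hstep]

-- count of a value in a flatMap of replicates over a Nodup list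
theorem pv_count_flat (c : Int → Nat) : ∀ (K : List Int), K.Nodup → ∀ v,
    (K.flatMap fun k => List.replicate (c k) k).count v = if v ∈ K then c v else 0 := by
  intro K
  induction K with
  | nil => simp
  | cons k K ih =>
    intro hnd v
    rcases List.nodup_cons.mp hnd with ⟨hk, hnd'⟩
    simp only [List.flatMap_cons, List.count_append, List.count_replicate, ih hnd' v,
      List.mem_cons]
    by_cases hv : v = k
    · subst hv; simp [hk]
    · have hkv : ¬ k = v := fun h => hv h.symm
      simp [hv, hkv]

-- the flatMap of replicates over a strictly increasing list is weakly increasing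
theorem pv_pairwise_flat (c : Int → Nat) : ∀ (K : List Int), K.Pairwise (· < ·) →
    (K.flatMap fun k => List.replicate (c k) k).Pairwise (· ≤ ·) := by
  intro K
  induction K with
  | nil => simp
  | cons k K ih =>
    intro hpw
    rcases List.pairwise_cons.mp hpw with ⟨hlt, hpw'⟩
    simp only [List.flatMap_cons]
    refine List.pairwise_append.mpr ⟨?_, ih hpw', ?_⟩
    · exact List.pairwise_replicate.mpr (Or.inr le_rfl)
    · intro a ha b hb
      rcases List.eq_of_mem_replicate ha with rfl
      rcases List.mem_flatMap.mp hb with ⟨k', hk', hb'⟩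
      rcases List.eq_of_mem_replicate hb' with rfl
      exact le_of_lt (hlt _ hk')

-- sorted multiset = sorted distinct values, each replicated by its multiplicity
theorem pv_sorted_flat (xs : List Int) :
    PySem.List.sorted xs (fun x => x) false
      = (PySem.List.sorted (PySem.Set.ofList xs) (fun x => x) false).flatMap
          (fun k => List.replicate (xs.count k) k) := by
  have hnd : (PySem.List.sorted (PySem.Set.ofList xs) (fun x => x) false).Nodup :=
    (PySem.List.sorted_perm (PySem.Set.ofList xs) (fun x => x) false).symm.nodup
      (PySem.Set.nodup_ofList xs)
  apply PySem.List.sorted_id_eq_of_perm_of_pairwise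
  · refine List.perm_iff_count.mpr (fun v => ?_)
    rw [pv_count_flat (fun k => xs.count k) _ hnd v]
    by_cases hv : v ∈ xs
    · simp [PySem.List.mem_sorted, PySem.Set.mem_ofList, hv]
    · simp [PySem.List.mem_sorted, PySem.Set.mem_ofList, hv, List.count_eq_zero.mpr hv]
  · exact pv_pairwise_flat _ _ (PySem.List.sorted_ofList_pairwise_lt xs)

-- equal neighbours reset A's run to 1 and contribute no hit
theorem pv_adj_replicate (m : Int) : ∀ (j : Nat) (p : Int) (rest : List Int) (run : Int),
    pvAdj m p (List.replicate j p ++ rest) run = pvAdj m p rest (if j = 0 then run else 1) := by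
  intro j
  induction j with
  | zero => intro p rest run; simp
  | succ j ih =>
    intro p rest run
    have hne : ¬ (p = p + 1) := by omega
    simp only [List.replicate_succ, List.cons_append, pvAdj, if_neg hne, ih]
    simp

-- core: A's scan over the replicated form = B's scan over the distinct values
theorem pv_harmonize (xs : List Int) (m : Int) : ∀ (K : List Int), K.Pairwise (· < ·) →
    (∀ k ∈ K, 0 < xs.count k) → ∀ (p run : Int),
    pvAdj m p (K.flatMap fun k => List.replicate (xs.count k) k) run
      = pvBLoop (PySem.Dict.counter xs) m K (some p) run := by
  intro K
  induction K with
  | nil => intro _ _ p run; simp [pvAdj, pvBLoop]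
  | cons v K ih =>
    intro hpw hpos p run
    rcases List.pairwise_cons.mp hpw with ⟨hlt, hpw'⟩
    have hpos' : ∀ k ∈ K, 0 < xs.count k := fun k hk => hpos k (List.mem_cons_of_mem _ hk)
    have hc : 0 < xs.count v := hpos v List.mem_cons_self
    obtain ⟨c, hcc⟩ : ∃ c, xs.count v = c + 1 := ⟨xs.count v - 1, by omega⟩
    have hgd : (PySem.Dict.counter xs).getD v 0 = ((c : Int) + 1) := by
      rw [PySem.Dict.getD_counter, hcc]; push_cast; ring
    simp only [List.flatMap_cons, hcc, List.replicate_succ, List.cons_append, pvAdj, pvBLoop,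
      hgd, pv_adj_replicate, ih hpw' hpos']
    by_cases h1 : v = p + 1 <;> by_cases h2 : c = 0
    · simp [h1, h2]
    · have h4 : 0 < c := Nat.pos_of_ne_zero h2
      simp [h1, h2, h4]
    · simp [h1, h2]
    · have h4 : 0 < c := Nat.pos_of_ne_zero h2
      simp [h1, h2, h4]

-- the two ports agree on every input
theorem pv_main (picks : List Int) (num m : Int) :
    bad_run_py picks num m = bad_run_py_alt picks num m := by
  have hct : ((picks.foldl (fun d v => d.insert v (d.getD v 0 + 1)) PySem.Dict.empty).insert num
      ((picks.foldl (fun d v => d.insert v (d.getD v 0 + 1)) PySem.Dict.empty).getD num 0 + 1))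
      = PySem.Dict.counter (picks ++ [num]) := by
    rw [← PySem.Dict.foldl_insert_getD_add_one_eq_counter, List.foldl_append]; rfl
  simp only [bad_run_py, bad_run_py_alt]
  rw [hct, PySem.Dict.keys_counter, pv_sorted_flat (picks ++ [num])]
  have hpw := PySem.List.sorted_ofList_pairwise_lt (picks ++ [num])
  have hpos : ∀ k ∈ PySem.List.sorted (PySem.Set.ofList (picks ++ [num])) (fun x => x) false,
      0 < (picks ++ [num]).count k := by
    intro k hk
    exact List.count_pos_iff.mpr
      ((PySem.Set.mem_ofList _ _).mp ((PySem.List.mem_sorted _ _ _ _).mp hk))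
  cases hKe : PySem.List.sorted (PySem.Set.ofList (picks ++ [num])) (fun x => x) false with
  | nil =>
    exfalso
    have h1 : num ∈ PySem.Set.ofList (picks ++ [num]) :=
      (PySem.Set.mem_ofList _ _).mpr (by simp)
    have h2 : num ∈ PySem.List.sorted (PySem.Set.ofList (picks ++ [num])) (fun x => x) false :=
      (PySem.List.mem_sorted _ _ _ _).mpr h1
    rw [hKe] at h2
    simp at h2
  | cons v K' =>
    rw [hKe] at hpw hpos
    rcases List.pairwise_cons.mp hpw with ⟨hlt, hpw'⟩
    have hpos' : ∀ k ∈ K', 0 < (picks ++ [num]).count k :=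
      fun k hk => hpos k (List.mem_cons_of_mem _ hk)
    have hc : 0 < (picks ++ [num]).count v := hpos v List.mem_cons_self
    obtain ⟨c, hcc⟩ : ∃ c, (picks ++ [num]).count v = c + 1 :=
      ⟨(picks ++ [num]).count v - 1, by omega⟩
    simp only [List.flatMap_cons, hcc, List.replicate_succ, List.cons_append]
    -- A side: index loop to structural scan (pre = [])
    have hA := pvALoop_eq_pvAdj m (List.replicate c v ++
        List.flatMap (fun k => List.replicate ((picks ++ [num]).count k) k) K') [] v 1
    simp only [List.nil_append, List.length_nil, Nat.cast_zero, zero_add] at hA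
    rw [show ((((v :: (List.replicate c v ++
          List.flatMap (fun k => List.replicate ((picks ++ [num]).count k) k) K')).length) : Int))
        = (1 + ((List.replicate c v ++
          List.flatMap (fun k => List.replicate ((picks ++ [num]).count k) k) K').length : Int))
      from by simp; ring]
    rw [hA, pv_adj_replicate, pv_harmonize (picks ++ [num]) m K' hpw' hpos' v]
    -- B side: the first key only sets prev; run becomes 1 either way
    simp [pvBLoop]

-- ===== VERDICT (by name: the statement is the Claim_ definition above) =====
theorem bad_run_py_spec : Claim_equal_bad_run_py := by
  intro picks num m _
  exact pv_main picks num m
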